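-- pv_equiv track=rewrite | github.com/ethancharles02/compression | Research_Testing/bit_grid.py | __get_symbol_counts
-- ===== SOURCE A (Python) =====
-- def __get_symbol_counts(iterable, symbol="1") -> list:
--     num_list = []
--
--     consec_bit_count = 0
--     for bit in iterable:
--         if bit == symbol:
--             consec_bit_count += 1
--         elif consec_bit_count > 0:
--             num_list.append(str(consec_bit_count))
--             consec_bit_count = 0
--
--     if consec_bit_count > 0:
--         num_list.append(str(consec_bit_count))
--
--     return num_list
-- ===== SOURCE B (Python) =====
-- def __get_symbol_counts(iterable, symbol="1") -> list:
--     # boundary-detection: find the index of each run start and each run end,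
--     # then pair them up and compute lengths by arithmetic
--     xs = list(iterable)
--     n = len(xs)
--     starts = [i for i in range(n) if xs[i] == symbol and (i == 0 or xs[i - 1] != symbol)]
--     ends = [i for i in range(n) if xs[i] == symbol and (i == n - 1 or xs[i + 1] != symbol)]
--     return [str(e - s + 1) for s, e in zip(starts, ends)]
-- ===== Notes on version B (the rewrite author's own statement) =====
-- stated objective: alternative
-- what changed: Replaces the streaming consecutive-counter with a boundary-detection algorithm: two index scans collect the start positions and end positions of maximal symbol runs, which are then zipped and each length computed arithmetically as end - start + 1.
import Mathlib
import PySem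

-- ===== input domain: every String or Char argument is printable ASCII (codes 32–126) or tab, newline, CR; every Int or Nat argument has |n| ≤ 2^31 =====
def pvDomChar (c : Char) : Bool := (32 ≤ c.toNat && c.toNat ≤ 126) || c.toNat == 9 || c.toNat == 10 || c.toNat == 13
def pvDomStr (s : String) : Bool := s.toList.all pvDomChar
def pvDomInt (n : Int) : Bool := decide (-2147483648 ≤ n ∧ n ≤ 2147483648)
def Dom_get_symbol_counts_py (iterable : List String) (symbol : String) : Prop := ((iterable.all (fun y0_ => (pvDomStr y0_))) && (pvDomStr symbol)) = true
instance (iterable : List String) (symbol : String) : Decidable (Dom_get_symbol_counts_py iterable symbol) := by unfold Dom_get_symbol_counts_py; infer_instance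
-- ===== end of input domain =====

-- B replaces A's streaming consecutive counter by boundary detection: two index scans
-- collect run-start and run-end positions, zipped into lengths end - start + 1 (alternative; same cost).

-- ===== PORT A =====
-- accumulator state: (num_list, consec_bit_count); final flush after the loop
def get_symbol_counts_py (iterable : List String) (symbol : String) : List String :=
  let st := iterable.foldl
    (fun (p : List String × Int) bit =>
      if bit == symbol then (p.1, p.2 + 1)
      else if p.2 > 0 then (p.1 ++ [PySem.Int.toStr p.2], 0)
      else p)
    ([], 0)
  if st.2 > 0 then st.1 ++ [PySem.Int.toStr st.2] else st.1

-- ===== PORT B =====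
-- list comprehensions over range(n) become filters of List.range n; indices drawn from
-- range n are always in range, so Python's xs[i] is List.getD i (exact here); the guarded
-- xs[i-1] / xs[i+1] accesses sit behind the same short-circuit disjunction as in Python.
def get_symbol_counts_py_alt (iterable : List String) (symbol : String) : List String :=
  let xs := iterable
  let n := xs.length
  let starts := (List.range n).filter
    (fun i => xs.getD i "" == symbol && (i == 0 || !(xs.getD (i - 1) "" == symbol)))
  let ends := (List.range n).filter
    (fun i => xs.getD i "" == symbol && (i == n - 1 || !(xs.getD (i + 1) "" == symbol)))
  (starts.zip ends).map (fun se => PySem.Int.toStr ((se.2 : Int) - (se.1 : Int) + 1))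

-- ===== PRECONDITION & SPEC =====
def Spec_get_symbol_counts_py (iterable : List String) (symbol : String) (out : List String) : Prop := out = get_symbol_counts_py_alt iterable symbol
instance (iterable : List String) (symbol : String) (out : List String) : Decidable (Spec_get_symbol_counts_py iterable symbol out) := by unfold Spec_get_symbol_counts_py; infer_instance

-- ===== CLAIM (what is proved, stated in full; the proofs are below) =====
def Claim_equal_get_symbol_counts_py : Prop := ∀ (iterable : List String) (symbol : String), Dom_get_symbol_counts_py iterable symbol → Spec_get_symbol_counts_py iterable symbol (get_symbol_counts_py iterable symbol)

-- ===== LEMMAS AND PROOFS =====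

-- ---------- A side: A's fold as a right-recursive "emit", then as the run lengths ----------

def pvEmit (symbol : String) (c : Int) : List String → List String
  | [] => if c > 0 then [PySem.Int.toStr c] else []
  | b :: bs =>
      if b == symbol then pvEmit symbol (c + 1) bs
      else if c > 0 then PySem.Int.toStr c :: pvEmit symbol 0 bs
      else pvEmit symbol 0 bs

theorem pvEmit_zero (symbol : String) (b : String) (bs : List String) (h : ¬ b = symbol) :
    pvEmit symbol 0 (b :: bs) = pvEmit symbol 0 bs := by
  simp [pvEmit, h]

-- A's left fold with accumulator (acc, c) equals acc ++ pvEmit symbol c l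
theorem pvFoldA (symbol : String) (l : List String) :
    ∀ (acc : List String) (c : Int), 0 ≤ c →
    (let st := l.foldl
        (fun (p : List String × Int) bit =>
          if bit == symbol then (p.1, p.2 + 1)
          else if p.2 > 0 then (p.1 ++ [PySem.Int.toStr p.2], 0)
          else p)
        (acc, c)
     if st.2 > 0 then st.1 ++ [PySem.Int.toStr st.2] else st.1)
    = acc ++ pvEmit symbol c l := by
  induction l with
  | nil =>
      intro acc c hc
      simp only [List.foldl_nil, pvEmit]
      split <;> simp
  | cons b bs ih =>
      intro acc c hc
      by_cases hb : b = symbol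
      · simpa [pvEmit, hb] using ih acc (c + 1) (by omega)
      · by_cases hcpos : c > 0
        · have := ih (acc ++ [PySem.Int.toStr c]) 0 le_rfl
          simp only [List.foldl_cons, pvEmit, hb, hcpos, if_true, if_false,
            beq_iff_eq] at this ⊢
          simp only [this, List.append_assoc, List.singleton_append]
        · have hc0 : c = 0 := by omega
          subst hc0
          have := ih acc 0 le_rfl
          simp only [List.foldl_cons, pvEmit, hb, beq_iff_eq] at this ⊢
          simpa using this

def pvSg (symbol : String) (prev : Bool) (xs : List String) : List Nat :=
  (List.range xs.length).filter
    (fun i => xs.getD i "" == symbol &&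
      (if i = 0 then !prev else !(xs.getD (i - 1) "" == symbol)))

def pvE (symbol : String) (xs : List String) : List Nat :=
  (List.range xs.length).filter
    (fun i => xs.getD i "" == symbol &&
      (i == xs.length - 1 || !(xs.getD (i + 1) "" == symbol)))

theorem range_succ_filter (p : Nat → Bool) (n : Nat) :
    (List.range (n + 1)).filter p =
      (if p 0 then [0] else []) ++ ((List.range n).filter (fun i => p (i + 1))).map (· + 1) := by
  rw [List.range_succ_eq_map, List.filter_cons, List.filter_map]
  simp only [Function.comp_def, Nat.succ_eq_add_one]
  split <;> simp

theorem pvSg_cons (symbol : String) (prev : Bool) (x : String) (xs : List String) :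
    pvSg symbol prev (x :: xs) =
      (if (x == symbol) && !prev then [0] else []) ++
        (pvSg symbol (x == symbol) xs).map (· + 1) := by
  unfold pvSg
  rw [List.length_cons, range_succ_filter]
  refine congrArg₂ (· ++ ·) (by simp) (congrArg _ (List.filter_congr ?_))
  intro i _
  cases i with
  | zero => simp
  | succ j => simp

theorem pvE_cons (symbol : String) (x : String) (xs : List String) :
    pvE symbol (x :: xs) =
      (if (x == symbol) && (decide (xs = []) || !(xs.getD 0 "" == symbol)) then [0] else []) ++
        (pvE symbol xs).map (· + 1) := by
  unfold pvE
  rw [List.length_cons, range_succ_filter]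
  refine congrArg₂ (· ++ ·) (by cases xs <;> simp) (congrArg _ (List.filter_congr ?_))
  intro i hi
  simp only [List.mem_range] at hi
  simp only [List.getD_cons_succ, Nat.add_sub_cancel]
  congr 2
  rw [Bool.eq_iff_iff]
  simp only [beq_iff_eq]
  omega

theorem pvSg_prev_irrel (symbol : String) (xs : List String)
    (h : xs = [] ∨ (xs.getD 0 "" == symbol) = false) :
    pvSg symbol true xs = pvSg symbol false xs := by
  cases xs with
  | nil => rfl
  | cons z zs =>
      have hz : (z == symbol) = false := by
        rcases h with h | h
        · simp at h
        · simpa using h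
      rw [pvSg_cons, pvSg_cons, hz]
      simp

theorem pvSg_run (symbol : String) :
    ∀ (t r : List String), (∀ y ∈ t, y = symbol) →
      (r = [] ∨ (r.getD 0 "" == symbol) = false) →
      pvSg symbol true (t ++ r) = (pvSg symbol false r).map (· + t.length) := by
  intro t
  induction t with
  | nil =>
      intro r _ hr
      simp [pvSg_prev_irrel symbol r hr]
  | cons y t' ih =>
      intro r ht hr
      have hy : y = symbol := ht y (by simp)
      rw [List.cons_append, pvSg_cons, hy]
      simp only [beq_self_eq_true, Bool.not_true, Bool.and_false, Bool.false_eq_true,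
        if_false, List.nil_append]
      rw [ih r (fun z hz => ht z (by simp [hz])) hr, List.map_map]
      simp only [List.length_cons]
      apply List.map_congr_left
      intro k _
      simp only [Function.comp_apply]
      omega

theorem pvE_run (symbol : String) :
    ∀ (t r : List String), t ≠ [] → (∀ y ∈ t, y = symbol) →
      (r = [] ∨ (r.getD 0 "" == symbol) = false) →
      pvE symbol (t ++ r) = (t.length - 1) :: (pvE symbol r).map (· + t.length) := by
  intro t
  induction t with
  | nil => intro r h; exact absurd rfl h
  | cons y t' ih =>
      intro r _ ht hr
      have hy : y = symbol := ht y (by simp)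
      rw [List.cons_append, pvE_cons, hy]
      cases t' with
      | nil =>
          have hprop : r = [] ∨ ¬ r.getD 0 "" = symbol := by
            rcases hr with h | h
            · exact Or.inl h
            · exact Or.inr (by simpa using h)
          simp only [List.nil_append]
          rw [if_pos (by simpa using hprop)]
          simp
      | cons z t'' =>
          have hz : z = symbol := ht z (by simp)
          have hcond : ((symbol == symbol) && (decide ((z :: t'') ++ r = []) || !(((z :: t'') ++ r).getD 0 "" == symbol))) = false := by
            simp [hz]
          simp only [hcond, Bool.false_eq_true, if_false, List.nil_append]
          rw [ih r (by simp) (fun w hw => ht w (by simp [hw])) hr]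
          simp only [List.map_cons, List.map_map, List.length_cons]
          refine congrArg₂ (· :: ·) (by omega) ?_
          apply List.map_congr_left
          intro k _
          simp only [Function.comp_apply]
          omega

def pvRuns (symbol : String) : List String → List Nat
  | [] => []
  | x :: xs =>
      if x = symbol then
        ((xs.takeWhile (fun y => y == symbol)).length + 1) ::
          pvRuns symbol (xs.dropWhile (fun y => y == symbol))
      else pvRuns symbol xs
termination_by l => l.length
decreasing_by
  · simp only [List.length_cons]
    exact Nat.lt_succ_of_le (List.length_dropWhile_le _ _)
  · simp

-- pumping a positive counter through the leading symbol-run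
theorem pvEmit_split (symbol : String) (xs : List String) :
    ∀ (c : Int), 0 < c →
    pvEmit symbol c xs =
      PySem.Int.toStr (c + ((xs.takeWhile (fun y => y == symbol)).length : Int)) ::
        pvEmit symbol 0 (xs.dropWhile (fun y => y == symbol)) := by
  induction xs with
  | nil => intro c hc; simp [pvEmit, hc]
  | cons y ys ih =>
      intro c hc
      by_cases hy : y = symbol
      · have := ih (c + 1) (by omega)
        simp only [pvEmit, hy, beq_self_eq_true, if_true, List.takeWhile_cons,
          List.dropWhile_cons, List.length_cons] at this ⊢
        rw [this]
        congr 2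
        push_cast
        ring
      · simp [pvEmit, hy, hc]

-- A's emit with counter 0 computes the run lengths
theorem pvEmit_runs (symbol : String) (l : List String) :
    pvEmit symbol 0 l = (pvRuns symbol l).map (fun (k : Nat) => PySem.Int.toStr (k : Int)) := by
  induction l using pvRuns.induct symbol with
  | case1 => simp [pvEmit, pvRuns]
  | case2 xs ih =>
      rw [pvRuns, if_pos rfl]
      have h1 : pvEmit symbol 0 (symbol :: xs) = pvEmit symbol 1 xs := by simp [pvEmit]
      rw [h1, pvEmit_split symbol xs 1 (by omega), ih]
      simp only [List.map_cons]
      congr 2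
      push_cast
      ring
  | case3 x xs hx ih =>
      rw [pvRuns, if_neg hx, pvEmit_zero symbol x xs hx, ih]

-- ---------- tying the two descriptions together ----------

theorem pvZip_runs (symbol : String) (l : List String) :
    ((pvSg symbol false l).zip (pvE symbol l)).map
        (fun se => PySem.Int.toStr ((se.2 : Int) - (se.1 : Int) + 1)) =
      (pvRuns symbol l).map (fun (k : Nat) => PySem.Int.toStr (k : Int)) := by
  induction l using pvRuns.induct symbol with
  | case1 => simp [pvSg, pvE, pvRuns]
  | case2 xs ih =>
      set t := xs.takeWhile (fun y => y == symbol) with htdef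
      set r := xs.dropWhile (fun y => y == symbol) with hrdef
      have hxs : xs = t ++ r := (List.takeWhile_append_dropWhile).symm
      have htall : ∀ y ∈ t, y = symbol := by
        intro y hy
        have := List.mem_takeWhile_imp hy
        simpa using this
      have hrh : r = [] ∨ (r.getD 0 "" == symbol) = false := by
        cases hr : r with
        | nil => exact Or.inl rfl
        | cons z zs =>
            right
            have hz : ((fun y => y == symbol) z) = false := by
              have := List.head?_dropWhile_not (fun y => y == symbol) xs
              rw [← hrdef, hr] at this
              simpa using this
            simpa using hz
      rw [pvRuns, if_pos rfl, ← htdef, ← hrdef, hxs]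
      rw [pvSg_cons]
      simp only [beq_self_eq_true, Bool.not_false, Bool.and_true]
      rw [if_pos trivial]
      rw [pvSg_run symbol t r htall hrh]
      have hEe : pvE symbol (symbol :: (t ++ r)) = ((symbol :: t).length - 1) :: (pvE symbol r).map (· + (symbol :: t).length) := by
        have := pvE_run symbol (symbol :: t) r (by simp)
          (by intro y hy; rcases List.mem_cons.mp hy with h | h; exact h; exact htall y h) hrh
        rw [List.cons_append] at this
        exact this
      rw [hEe]
      simp only [List.length_cons, Nat.add_sub_cancel, List.map_map, List.singleton_append,
        List.zip_cons_cons, List.map_cons]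
      rw [← ih]
      refine congrArg₂ (· :: ·) ?_ ?_
      · congr 1
      · rw [List.zip_map, List.map_map]
        apply List.map_congr_left
        intro se _
        simp only [Function.comp_apply, Prod.map]
        push_cast
        ring_nf
  | case3 x xs hx ih =>
      rw [pvRuns, if_neg hx]
      have hxb : (x == symbol) = false := by simpa using hx
      rw [pvSg_cons, pvE_cons, hxb]
      simp only [Bool.false_and, Bool.false_eq_true, if_false, List.nil_append]
      rw [List.zip_map, List.map_map, ← ih]
      apply List.map_congr_left
      intro se _
      simp only [Function.comp_apply, Prod.map]
      push_cast
      ring_nf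


-- B's port unfolds to the generalized boundary lists
theorem pvAlt_eq (iterable : List String) (symbol : String) :
    get_symbol_counts_py_alt iterable symbol =
      ((pvSg symbol false iterable).zip (pvE symbol iterable)).map
        (fun se => PySem.Int.toStr ((se.2 : Int) - (se.1 : Int) + 1)) := by
  unfold get_symbol_counts_py_alt pvSg pvE
  refine congrArg (List.map _) (congrArg₂ List.zip (List.filter_congr ?_) rfl)
  intro i _
  cases i <;> simp

-- ===== VERDICT (by name: the statement is the Claim_ definition above) =====
theorem get_symbol_counts_py_spec : Claim_equal_get_symbol_counts_py := by
  intro iterable symbol _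
  unfold Spec_get_symbol_counts_py get_symbol_counts_py
  rw [pvFoldA symbol iterable [] 0 le_rfl, pvAlt_eq, pvZip_runs, pvEmit_runs]
  simp
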